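-- pv_equiv track=rewrite | github.com/Saqib9828/TreeFoX | Tree-FoX/model/micro_ex.py | split_dict
-- ===== SOURCE A (Python) =====
-- def split_dict(dct, key_):
--     length = len(dct[key_])
--     dict1 = {}
--     dict2 = {}
--
--     for key, value in dct.items():
--         if key == key_:
--             dict1[key] = value[:length // 2]
--             dict2[key] = value[length // 2:]
--         else:
--             dict1[key] = dict2[key] = value
--
--     return dict1, dict2
-- ===== SOURCE B (Python) =====
-- def split_dict(dct, key_):
--     v = dct[key_]
--     half = len(v) // 2
--     items = list(dct.items())
--     i = next(j for j, (k, _) in enumerate(items) if k == key_)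
--     dict1 = dict(items[:i] + [(key_, v[:half])] + items[i + 1:])
--     dict2 = dict(items[:i] + [(key_, v[half:])] + items[i + 1:])
--     return dict1, dict2
-- ===== Notes on version B (the rewrite author's own statement) =====
-- stated objective: alternative
-- what changed: Instead of A's per-item loop that branches on every key while rebuilding both dicts, B locates the position of the split key once, splices the item sequence around that single position (prefix + patched pair + suffix) and rebuilds each dict from the spliced list, so no per-item comparison or branch remains.
import Mathlib
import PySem

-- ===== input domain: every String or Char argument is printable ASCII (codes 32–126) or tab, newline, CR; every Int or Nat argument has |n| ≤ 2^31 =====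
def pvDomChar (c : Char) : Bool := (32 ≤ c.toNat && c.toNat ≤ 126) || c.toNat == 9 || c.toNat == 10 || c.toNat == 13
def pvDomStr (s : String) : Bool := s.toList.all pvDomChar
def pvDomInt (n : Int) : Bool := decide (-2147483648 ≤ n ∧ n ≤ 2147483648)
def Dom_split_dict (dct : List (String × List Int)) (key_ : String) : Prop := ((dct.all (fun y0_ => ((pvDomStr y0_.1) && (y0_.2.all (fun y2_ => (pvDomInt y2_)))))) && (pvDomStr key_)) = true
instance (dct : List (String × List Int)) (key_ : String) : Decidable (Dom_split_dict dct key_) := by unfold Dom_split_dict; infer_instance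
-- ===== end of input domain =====

-- B locates the split key's position once and splices the item list around it (prefix + patched pair + suffix), replacing A's per-item branching loop: alternative decomposition, same cost.


-- ===== PORT A =====
-- literal transliteration: look up dct[key_] (KeyError → Pre_), then loop over dct.items()
-- building dict1/dict2 by insertion, branching on key == key_.
def split_dict (dct : List (String × List Int)) (key_ : String) : (List (String × List Int)) × (List (String × List Int)) :=
  match (PySem.Dict.mk dct).get? key_ with
  | none => ([], [])  -- KeyError; excluded by Pre_split_dict
  | some v =>
    let length : Int := v.length
    let p := dct.foldl
      (fun (p : PySem.Dict String (List Int) × PySem.Dict String (List Int)) kv =>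
        if kv.1 == key_ then
          (p.1.insert kv.1 (PySem.List.slice kv.2 none (some (PySem.Int.floordiv length 2))),
           p.2.insert kv.1 (PySem.List.slice kv.2 (some (PySem.Int.floordiv length 2)) none))
        else
          (p.1.insert kv.1 kv.2, p.2.insert kv.1 kv.2))
      (PySem.Dict.empty, PySem.Dict.empty)
    (p.1.items, p.2.items)

-- ===== PORT B =====
-- literal transliteration of Source B: find the split key's index with next/enumerate,
-- splice the item list around it, and build each dict from the spliced list.
def split_dict_alt (dct : List (String × List Int)) (key_ : String) : (List (String × List Int)) × (List (String × List Int)) :=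
  match (PySem.Dict.mk dct).get? key_ with
  | none => ([], [])  -- KeyError; excluded by Pre_split_dict
  | some v =>
    let half : Int := PySem.Int.floordiv (v.length : Int) 2
    let items := (PySem.Dict.mk dct).items
    match items.findIdx? (fun kv => kv.1 == key_) with
    | none => ([], [])  -- StopIteration for next(); unreachable when the lookup above succeeded
    | some i =>
      let dict1 := PySem.Dict.ofList
        (PySem.List.slice items none (some (i : Int)) ++
          [(key_, PySem.List.slice v none (some half))] ++
          PySem.List.slice items (some ((i : Int) + 1)) none)
      let dict2 := PySem.Dict.ofList
        (PySem.List.slice items none (some (i : Int)) ++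
          [(key_, PySem.List.slice v (some half) none)] ++
          PySem.List.slice items (some ((i : Int) + 1)) none)
      (dict1.items, dict2.items)

-- ===== PRECONDITION & SPEC =====
-- Pre_ excludes inputs where key_ is absent (Python A raises KeyError there, and so does B) and
-- association lists with duplicate keys, which do not represent any Python dict.
def Pre_split_dict (dct : List (String × List Int)) (key_ : String) : Prop :=
  (dct.map Prod.fst).Nodup ∧ key_ ∈ dct.map Prod.fst
instance (dct : List (String × List Int)) (key_ : String) : Decidable (Pre_split_dict dct key_) := by unfold Pre_split_dict; infer_instance

def pvWitness_split_dict : (List (String × List Int)) × String := ([("a", [1, 2, 3]), ("b", [4])], "a")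

def Spec_split_dict (dct : List (String × List Int)) (key_ : String) (out : (List (String × List Int)) × (List (String × List Int))) : Prop := out = split_dict_alt dct key_
instance (dct : List (String × List Int)) (key_ : String) (out : (List (String × List Int)) × (List (String × List Int))) : Decidable (Spec_split_dict dct key_ out) := by unfold Spec_split_dict; infer_instance

-- ===== CLAIM (what is proved, stated in full; the proofs are below) =====
def Claim_equal_split_dict : Prop := ∀ (dct : List (String × List Int)) (key_ : String), Dom_split_dict dct key_ → Pre_split_dict dct key_ → Spec_split_dict dct key_ (split_dict dct key_)

-- ===== LEMMAS AND PROOFS =====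

-- A's pair-fold splits into two independent insert-folds.
theorem pair_foldl_split (l : List (String × List Int))
    (f g : String × List Int → List Int)
    (a b : PySem.Dict String (List Int)) :
    l.foldl (fun (p : PySem.Dict String (List Int) × PySem.Dict String (List Int)) kv =>
        (p.1.insert kv.1 (f kv), p.2.insert kv.1 (g kv))) (a, b)
      = (l.foldl (fun d kv => d.insert kv.1 (f kv)) a,
         l.foldl (fun d kv => d.insert kv.1 (g kv)) b) := by
  induction l generalizing a b with
  | nil => rfl
  | cons x xs ih => simp [List.foldl_cons, ih]

-- ofList on a duplicate-free association list reproduces it.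
theorem items_ofList_nodup (l : List (String × List Int))
    (h : (l.map Prod.fst).Nodup) :
    (PySem.Dict.ofList l).items = l := by
  have := PySem.Dict.items_foldl_insert_fresh l Prod.fst Prod.snd PySem.Dict.empty
    (by intro a _; simp [PySem.Dict.contains_empty]) h
  simpa [PySem.Dict.ofList, PySem.Dict.update] using this

-- B's splice (prefix + patched pair + suffix at the first index of key_) is exactly the
-- per-item patched map, when keys are duplicate-free.
theorem splice_eq_map (key_ : String) (w : List Int) :
    ∀ (l : List (String × List Int)) (i : Nat),
      (l.map Prod.fst).Nodup →
      l.findIdx? (fun kv => kv.1 == key_) = some i →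
      l.take i ++ (key_, w) :: l.drop (i + 1)
        = l.map (fun p => if p.1 == key_ then (key_, w) else p) := by
  intro l
  induction l with
  | nil => intro i _ h; simp at h
  | cons x xs ih =>
    intro i hnd hfind
    rw [List.map_cons, List.nodup_cons] at hnd
    by_cases hx : x.1 == key_
    · have hi : i = 0 := by
        rw [List.findIdx?_cons, hx] at hfind
        simpa using hfind.symm
      subst hi
      have hkey : x.1 = key_ := by simpa using hx
      have hmap : xs.map (fun p => if p.1 == key_ then (key_, w) else p) = xs := by
        have h2 : xs.map (fun p => if p.1 == key_ then (key_, w) else p) = xs.map id :=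
          List.map_congr_left (by
            intro p hp
            have hne : p.1 ≠ key_ := by
              intro h
              exact hnd.1 (by rw [hkey, ← h]; exact List.mem_map_of_mem hp)
            simp [hne])
        simpa using h2
      simp only [List.take_zero, List.nil_append, List.drop_succ_cons, List.drop_zero,
        List.map_cons, if_pos hx, hmap]
    · rw [List.findIdx?_cons, if_neg (by simpa using hx)] at hfind
      rcases Option.map_eq_some_iff.mp hfind with ⟨j, hj, hij⟩
      subst hij
      have hrec := ih j hnd.2 hj
      simp only [List.take_succ_cons, List.drop_succ_cons, List.map_cons, List.cons_append,
        if_neg hx, hrec]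

theorem split_dict_eq (dct : List (String × List Int)) (key_ : String)
    (hnd : (dct.map Prod.fst).Nodup) (hk : key_ ∈ dct.map Prod.fst) :
    split_dict dct key_ = split_dict_alt dct key_ := by
  have hmk : (PySem.Dict.mk dct : PySem.Dict String (List Int)).items = dct := rfl
  have hcont : (PySem.Dict.mk dct : PySem.Dict String (List Int)).contains key_ = true := by
    rw [PySem.Dict.contains_iff_mem_keys]
    simpa [PySem.Dict.keys, hmk] using hk
  obtain ⟨v, hv⟩ : ∃ v, (PySem.Dict.mk dct : PySem.Dict String (List Int)).get? key_ = some v := by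
    rcases h : (PySem.Dict.mk dct : PySem.Dict String (List Int)).get? key_ with _ | v
    · rw [PySem.Dict.get?_eq_none_iff_contains] at h; simp [hcont] at h
    · exact ⟨v, rfl⟩
  -- unique value at key_
  have hval : ∀ kv ∈ dct, kv.1 = key_ → kv.2 = v := by
    intro kv hmem hkey
    have : (PySem.Dict.mk dct : PySem.Dict String (List Int)).get? kv.1 = some kv.2 :=
      PySem.Dict.get?_of_mem_items _ (by simpa [hmk] using hmem)
        (by simpa [PySem.Dict.keys, hmk] using hnd)
    rw [hkey, hv] at this; exact (Option.some_injective _ this).symm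
  -- the index search in B succeeds
  obtain ⟨i, hi⟩ : ∃ i, dct.findIdx? (fun kv => kv.1 == key_) = some i := by
    rcases h : dct.findIdx? (fun kv => kv.1 == key_) with _ | i
    · rw [List.findIdx?_eq_none_iff] at h
      rcases List.mem_map.mp hk with ⟨kv, hmem, hkey⟩
      have := h kv hmem
      simp [hkey] at this
    · exact ⟨i, h⟩
  unfold split_dict split_dict_alt
  rw [hv]
  simp only [hi]
  -- canonical form shared by the two sides
  set w1 : List Int := PySem.List.slice v none (some (PySem.Int.floordiv (v.length : Int) 2)) with hw1
  set w2 : List Int := PySem.List.slice v (some (PySem.Int.floordiv (v.length : Int) 2)) none with hw2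
  -- A side: fold → patched map
  have hstep :
      (fun (p : PySem.Dict String (List Int) × PySem.Dict String (List Int)) (kv : String × List Int) =>
        if kv.1 == key_ then
          (p.1.insert kv.1 (PySem.List.slice kv.2 none (some (PySem.Int.floordiv (v.length : Int) 2))),
           p.2.insert kv.1 (PySem.List.slice kv.2 (some (PySem.Int.floordiv (v.length : Int) 2)) none))
        else (p.1.insert kv.1 kv.2, p.2.insert kv.1 kv.2))
      = (fun p kv =>
          (p.1.insert kv.1 (if kv.1 == key_ then PySem.List.slice kv.2 none (some (PySem.Int.floordiv (v.length : Int) 2)) else kv.2),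
           p.2.insert kv.1 (if kv.1 == key_ then PySem.List.slice kv.2 (some (PySem.Int.floordiv (v.length : Int) 2)) none else kv.2))) := by
    funext p kv; by_cases h : kv.1 == key_ <;> simp [h]
  simp only [hstep, pair_foldl_split]
  have hfold : ∀ f : String × List Int → List Int,
      (dct.foldl (fun (d : PySem.Dict String (List Int)) kv => d.insert kv.1 (f kv))
        PySem.Dict.empty).items = dct.map (fun kv => (kv.1, f kv)) := by
    intro f
    have := PySem.Dict.items_foldl_insert_fresh dct Prod.fst f PySem.Dict.empty
      (by intro a _; simp [PySem.Dict.contains_empty]) hnd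
    simpa using this
  -- A's map equals the canonical patched map (using uniqueness of the value at key_)
  have hmapA : ∀ w : List Int, ∀ g : List Int → List Int, w = g v →
      dct.map (fun kv => (kv.1, if kv.1 == key_ then g kv.2 else kv.2))
        = dct.map (fun p => if p.1 == key_ then (key_, w) else p) := by
    intro w g hw
    apply List.map_congr_left
    intro kv hmem
    by_cases h : kv.1 = key_
    · simp [h, hw, hval kv hmem h]
    · simp [h]
  -- B side: slices → take/drop, splice_eq_map, nodup of the spliced keys
  have hslice1 : PySem.List.slice dct none (some (i : Int)) = dct.take i :=
    PySem.List.slice_to_natCast dct i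
  have hslice2 : PySem.List.slice dct (some ((i : Int) + 1)) none = dct.drop (i + 1) := by
    have := PySem.List.slice_from_natCast dct (i + 1)
    simpa [Nat.cast_add] using this
  have hB : ∀ w : List Int,
      (PySem.Dict.ofList (dct.take i ++ [(key_, w)] ++ dct.drop (i + 1))).items
        = dct.map (fun p => if p.1 == key_ then (key_, w) else p) := by
    intro w
    have hsplice := splice_eq_map key_ w dct i hnd hi
    have heq : dct.take i ++ [(key_, w)] ++ dct.drop (i + 1)
        = dct.map (fun p => if p.1 == key_ then (key_, w) else p) := by
      simpa using hsplice
    rw [heq]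
    apply items_ofList_nodup
    have hfst : (dct.map (fun p => if p.1 == key_ then (key_, w) else p)).map Prod.fst
        = dct.map Prod.fst := by
      rw [List.map_map]
      apply List.map_congr_left
      intro p _
      by_cases h : p.1 = key_ <;> simp [h]
    rw [hfst]; exact hnd
  refine Prod.ext ?_ ?_ <;> simp only [hslice1, hslice2, hB, hfold]
  · exact hmapA w1 (fun u => PySem.List.slice u none (some (PySem.Int.floordiv (v.length : Int) 2))) hw1
  · exact hmapA w2 (fun u => PySem.List.slice u (some (PySem.Int.floordiv (v.length : Int) 2)) none) hw2

-- ===== VERDICT (by name: the statement is the Claim_ definition above) =====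
theorem split_dict_spec : Claim_equal_split_dict := by
  intro dct key_ _ hpre
  exact split_dict_eq dct key_ hpre.1 hpre.2
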